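-- pv_equiv track=rewrite | github.com/pypi-data/pypi-mirror-96 | packages/pcsg/pcsg-0.0.3.tar.gz/pcsg-0.0.3/pcsg/tool.py | _encodePartName
-- ===== SOURCE A (Python) =====
-- def _encodePartName (partName):
--     assert isinstance (partName, str)
--     result = ""
--     for ch in partName:
--         if (ord (ch) >= ord ('a')) and (ord (ch) <= ord ('z')):
--             result += ch
--         elif (ord (ch) >= ord ('A')) and (ord (ch) <= ord ('Z')):
--             result += ch
--         elif (ord (ch) >= ord ('0')) and (ord (ch) <= ord ('9')):
--             result += ch
--         elif ch in ("-", "_", "."):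
--             result += ch
--         elif ch in (" ", "\t", "\r", "\n"):
--             result += "-"
--         else:
--             result += "_"
--     return result
-- ===== SOURCE B (Python) =====
-- import re
--
-- def _encodePartName(partName):
--     assert isinstance(partName, str)
--     # pass 1: exactly the four whitespace characters become '-'
--     s = re.sub(r'[ \t\r\n]', '-', partName)
--     # pass 2: everything not in the allowed set becomes '_'
--     return re.sub(r'[^A-Za-z0-9_.\-]', '_', s)
-- ===== Notes on version B (the rewrite author's own statement) =====
-- stated objective: idiomatic
-- what changed: Replaced the per-character branch-chain loop with two sequential regex substitution passes over the whole string (whitespace to '-', then any remaining non-allowed character to '_'), moving the scan into the C-level regex engine.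
import Mathlib
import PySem

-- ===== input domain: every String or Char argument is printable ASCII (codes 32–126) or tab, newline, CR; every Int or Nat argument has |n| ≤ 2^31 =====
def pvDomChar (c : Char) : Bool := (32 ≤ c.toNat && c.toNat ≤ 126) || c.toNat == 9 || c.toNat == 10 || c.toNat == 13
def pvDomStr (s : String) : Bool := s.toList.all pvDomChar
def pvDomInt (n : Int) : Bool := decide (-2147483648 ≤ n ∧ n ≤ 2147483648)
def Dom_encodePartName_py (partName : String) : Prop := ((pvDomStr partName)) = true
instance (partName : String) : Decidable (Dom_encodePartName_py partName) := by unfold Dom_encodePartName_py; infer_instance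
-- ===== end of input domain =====

-- B replaces A's per-character branch-chain loop with two whole-string substitution
-- passes (whitespace → '-', then non-allowed → '_'), more idiomatic (regex in Python).

-- ===== PORT A =====
-- one loop iteration: the branch chain of A, appending to the accumulated result
def pvEncStep (result : List Char) (ch : Char) : List Char :=
  if ('a'.toNat ≤ ch.toNat) ∧ (ch.toNat ≤ 'z'.toNat) then result ++ [ch]
  else if ('A'.toNat ≤ ch.toNat) ∧ (ch.toNat ≤ 'Z'.toNat) then result ++ [ch]
  else if ('0'.toNat ≤ ch.toNat) ∧ (ch.toNat ≤ '9'.toNat) then result ++ [ch]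
  else if ch = '-' ∨ ch = '_' ∨ ch = '.' then result ++ [ch]
  else if ch = ' ' ∨ ch = '\t' ∨ ch = '\r' ∨ ch = '\n' then result ++ ['-']
  else result ++ ['_']

def encodePartName_py (partName : String) : String :=
  String.ofList (partName.toList.foldl pvEncStep [])

-- ===== PORT B =====
-- pass 1: re.sub(r'[ \t\r\n]', '-', partName) — per character, exact on this 1-char pattern
def pvSubWs (c : Char) : Char :=
  if c = ' ' ∨ c = '\t' ∨ c = '\r' ∨ c = '\n' then '-' else c

-- pass 2: re.sub(r'[^A-Za-z0-9_.\-]', '_', s)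
def pvSubBad (c : Char) : Char :=
  if ('A'.toNat ≤ c.toNat ∧ c.toNat ≤ 'Z'.toNat) ∨ ('a'.toNat ≤ c.toNat ∧ c.toNat ≤ 'z'.toNat)
     ∨ ('0'.toNat ≤ c.toNat ∧ c.toNat ≤ '9'.toNat) ∨ c = '_' ∨ c = '.' ∨ c = '-'
  then c else '_'

def encodePartName_py_alt (partName : String) : String :=
  String.ofList ((partName.toList.map pvSubWs).map pvSubBad)

-- ===== PRECONDITION & SPEC =====
def Spec_encodePartName_py (partName : String) (out : String) : Prop := out = encodePartName_py_alt partName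
instance (partName : String) (out : String) : Decidable (Spec_encodePartName_py partName out) := by unfold Spec_encodePartName_py; infer_instance

-- ===== CLAIM (what is proved, stated in full; the proofs are below) =====
def Claim_equal_encodePartName_py : Prop := ∀ (partName : String), Dom_encodePartName_py partName → Spec_encodePartName_py partName (encodePartName_py partName)

-- ===== LEMMAS AND PROOFS =====
lemma pvCharEq_iff (a b : Char) : a = b ↔ a.toNat = b.toNat :=
  ⟨fun h => h ▸ rfl, fun h => Char.ext (UInt32.toNat_inj.mp h)⟩

lemma pvEncStep_eq (result : List Char) (ch : Char) :
    pvEncStep result ch = result ++ [pvSubBad (pvSubWs ch)] := by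
  unfold pvEncStep pvSubWs pvSubBad
  simp only [pvCharEq_iff]
  split_ifs <;> simp_all [pvCharEq_iff] <;> omega

lemma pvFold_eq (l : List Char) (acc : List Char) :
    l.foldl pvEncStep acc = acc ++ (l.map pvSubWs).map pvSubBad := by
  induction l generalizing acc with
  | nil => simp
  | cons c l ih => simp [List.foldl, pvEncStep_eq, ih]

-- ===== VERDICT (by name: the statement is the Claim_ definition above) =====
theorem encodePartName_py_spec : Claim_equal_encodePartName_py := by
  intro partName _
  unfold Spec_encodePartName_py encodePartName_py encodePartName_py_alt
  rw [pvFold_eq]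
  simp
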